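-- pv_equiv track=rewrite | github.com/SohaibAamir28/M-IT-2-2025-Winter-Contest | begINEERS/2.py | is_repetitive
-- ===== SOURCE A (Python) =====
-- def is_repetitive(s):
--     # Check if the string starts with M
--     if not s.startswith("M"):
--         return False
--     i = 1
--     n = len(s)
--     # Check the remaining part of the string
--     while i < n:
--         if i + 1 < n and s[i:i+2] == "IT":
--             i += 2
--         else:
--             return False
--     return True
-- ===== SOURCE B (Python) =====
-- def is_repetitive(s):
--     # "M" followed by zero or more "IT": build the expected tail and compare once.
--     return s.startswith("M") and s[1:] == "IT" * ((len(s) - 1) // 2)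
-- ===== Notes on version B (the rewrite author's own statement) =====
-- stated objective: simpler
-- what changed: Replaces the index-stepping while-loop that inspects two-character slices with a single build-and-compare: the tail s[1:] is compared against the constructed string 'IT' repeated (len(s)-1)//2 times.
import Mathlib
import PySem

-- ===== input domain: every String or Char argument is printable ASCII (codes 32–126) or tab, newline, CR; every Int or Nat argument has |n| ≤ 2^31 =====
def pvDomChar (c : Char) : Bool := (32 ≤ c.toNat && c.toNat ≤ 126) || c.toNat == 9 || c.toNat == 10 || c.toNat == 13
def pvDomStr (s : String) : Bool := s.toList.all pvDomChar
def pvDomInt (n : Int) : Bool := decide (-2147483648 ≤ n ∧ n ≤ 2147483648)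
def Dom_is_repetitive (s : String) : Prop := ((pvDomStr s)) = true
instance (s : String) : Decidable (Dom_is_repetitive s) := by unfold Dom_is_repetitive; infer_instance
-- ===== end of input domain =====

-- B replaces A's two-character-slice stepping loop with one build-and-compare of the whole expected tail (objective: simpler).

-- ===== PORT A =====
-- while i < n: if i+1 < n and s[i:i+2] == "IT": i += 2 else: return False
def isRepLoopA (cs : List Char) (n : Int) (i : Int) : Nat → Bool
  | 0 => true
  | fuel + 1 =>
    if i < n then
      if (decide (i + 1 < n) && (PySem.List.slice cs (some i) (some (i + 2)) == ['I', 'T'])) then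
        isRepLoopA cs n (i + 2) fuel
      else false
    else true

def is_repetitive (s : String) : Bool :=
  if !(PySem.Str.startswith s "M") then false
  else isRepLoopA s.toList (PySem.Str.len s) 1 s.toList.length

-- ===== PORT B =====
def is_repetitive_alt (s : String) : Bool :=
  PySem.Str.startswith s "M" &&
    (PySem.List.slice s.toList (some 1) none ==
      (List.replicate (PySem.Int.floordiv (PySem.Str.len s - 1) 2).toNat ['I', 'T']).flatten)

-- ===== PRECONDITION & SPEC =====
def Spec_is_repetitive (s : String) (out : Bool) : Prop := out = is_repetitive_alt s
instance (s : String) (out : Bool) : Decidable (Spec_is_repetitive s out) := by unfold Spec_is_repetitive; infer_instance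

-- ===== CLAIM (what is proved, stated in full; the proofs are below) =====
def Claim_equal_is_repetitive : Prop := ∀ (s : String), Dom_is_repetitive s → Spec_is_repetitive s (is_repetitive s)

-- ===== LEMMAS AND PROOFS =====

-- what A's loop decides about the tail: a run of "IT" pairs
def tailCheck : List Char → Bool
  | [] => true
  | [_] => false
  | a :: b :: r => (a == 'I') && (b == 'T') && tailCheck r

theorem tailCheck_eq_replicate : ∀ l : List Char,
    tailCheck l = (l == (List.replicate (l.length / 2) ['I', 'T']).flatten)
  | [] => by decide
  | [a] => by simp [tailCheck]
  | a :: b :: r => by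
    have ih := tailCheck_eq_replicate r
    simp only [tailCheck, List.length_cons]
    have h2 : (r.length + 1 + 1) / 2 = r.length / 2 + 1 := by omega
    rw [h2, List.replicate_succ]
    simp only [List.flatten_cons, List.cons_append, List.nil_append, ih]
    simp [Bool.and_assoc]

theorem loopA_eq : ∀ (fuel : Nat) (cs : List Char) (j : Nat), cs.length ≤ fuel + j →
    isRepLoopA cs (cs.length : Int) (j : Int) fuel = tailCheck (cs.drop j)
  | 0, cs, j, h => by
    have : cs.drop j = [] := List.drop_eq_nil_of_le (by omega)
    simp [isRepLoopA, this, tailCheck]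
  | fuel + 1, cs, j, h => by
    by_cases hj : j < cs.length
    · have e1 : ((j : Int)).toNat = j := by omega
      have e2 : ((j : Int) + 2).toNat = j + 2 := by omega
      have e3 : j + 2 - j = 2 := by omega
      have hslice : PySem.List.slice cs (some (j : Int)) (some ((j : Int) + 2))
          = (cs.drop j).take 2 := by
        rw [PySem.List.slice_toNat cs (by positivity) (by positivity), e1, e2, e3]
      rw [isRepLoopA]
      rw [if_pos (by exact_mod_cast hj)]
      rcases hd : cs.drop j with _ | ⟨a, t⟩
      · exfalso; have := List.length_drop (l := cs) (i := j); rw [hd] at this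
        simp only [List.length_nil] at this; omega
      rcases ht : t with _ | ⟨b, r⟩
      · -- exactly one char left: j + 1 = cs.length
        have hlen : cs.length = j + 1 := by
          have := List.length_drop (l := cs) (i := j)
          rw [hd, ht] at this; simp only [List.length_cons, List.length_nil] at this; omega
        have hnlt : ¬ ((j : Int) + 1 < (cs.length : Int)) := by
          exact_mod_cast (by omega : ¬ (j + 1 < cs.length))
        rw [decide_eq_false hnlt]
        simp only [Bool.false_and, Bool.false_eq_true, if_false]
        simp [tailCheck]
      · -- at least two chars left
        subst ht
        have hlen2 : j + 2 ≤ cs.length := by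
          have := List.length_drop (l := cs) (i := j)
          rw [hd] at this; simp only [List.length_cons] at this; omega
        have hlt : ((j : Int) + 1 < (cs.length : Int)) := by
          exact_mod_cast (by omega : j + 1 < cs.length)
        have htake : (cs.drop j).take 2 = [a, b] := by rw [hd]; rfl
        have hdrop2 : cs.drop (j + 2) = r := by
          have hdd : cs.drop (j + 2) = (cs.drop j).drop 2 := by
            rw [List.drop_drop]
          rw [hdd, hd]; rfl
        by_cases hab : a = 'I' ∧ b = 'T'
        · obtain ⟨ha, hb⟩ := hab
          subst ha; subst hb
          rw [hslice, htake]
          simp only [hlt, decide_true, Bool.true_and, beq_self_eq_true, if_true]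
          have hcast : (j : Int) + 2 = ((j + 2 : Nat) : Int) := by push_cast; ring
          rw [hcast, loopA_eq fuel cs (j + 2) (by omega), hdrop2]
          simp [tailCheck]
        · rw [hslice, htake]
          have hne2 : ([a, b] : List Char) ≠ ['I', 'T'] := by
            intro he
            injection he with h1 h2
            injection h2 with h3 _
            exact hab ⟨h1, h3⟩
          rw [beq_eq_false_iff_ne.mpr hne2]
          simp only [Bool.and_false, Bool.false_eq_true, if_false, tailCheck]
          cases h1 : a == 'I' <;> cases h2 : b == 'T' <;> simp_all
    · have hge : ¬ ((j : Int) < (cs.length : Int)) := by exact_mod_cast hj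
      rw [isRepLoopA, if_neg hge]
      have : cs.drop j = [] := List.drop_eq_nil_of_le (by omega)
      simp [this, tailCheck]

theorem startswith_M_ne_nil {s : String} (h : PySem.Str.startswith s "M" = true) :
    s.toList ≠ [] := by
  simp only [PySem.Str.startswith_eq] at h
  rw [PySem.Chars.startswith_iff] at h
  intro hnil
  rw [hnil] at h
  simp at h

-- ===== VERDICT (by name: the statement is the Claim_ definition above) =====
theorem is_repetitive_spec : Claim_equal_is_repetitive := by
  unfold Claim_equal_is_repetitive
  intro s _
  unfold Spec_is_repetitive is_repetitive is_repetitive_alt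
  by_cases hsw : PySem.Str.startswith s "M" = true
  · have hne := startswith_M_ne_nil hsw
    have hpos : 0 < s.toList.length := List.length_pos_of_ne_nil hne
    simp only [hsw, Bool.not_true, Bool.false_eq_true, if_false, Bool.true_and]
    simp only [PySem.Str.len_eq]
    have hloop := loopA_eq s.toList.length s.toList 1 (by omega)
    simp only [Nat.cast_one] at hloop
    rw [hloop, tailCheck_eq_replicate, PySem.List.slice_from_one]
    have e1 : s.toList.tail = s.toList.drop 1 := List.drop_one.symm
    have ecast : ((s.toList.length : Int) - 1) = (((s.toList.drop 1).length : Nat) : Int) := by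
      rw [List.length_drop]; omega
    have e3 : PySem.Int.floordiv (((s.toList.drop 1).length : Nat) : Int) 2
        = (((s.toList.drop 1).length / 2 : Nat) : Int) := by
      exact_mod_cast PySem.Int.floordiv_natCast _ 2
    have e2 : (PySem.Int.floordiv ((s.toList.length : Int) - 1) 2).toNat
        = (s.toList.drop 1).length / 2 := by
      rw [ecast, e3]; omega
    rw [e1, e2]
  · simp only [Bool.not_eq_true] at hsw
    have hcs : PySem.Chars.startswith s.toList ['M'] = false := by
      simpa [PySem.Str.startswith_eq] using hsw
    simp [hcs]
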